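-- pv_equiv track=rewrite | github.com/HelloWorldSungin/ark-skills | skills/ark-workflow/scripts/context_probe.py | _set_proceed_past_level
-- ===== SOURCE A (Python) =====
-- def _set_proceed_past_level(text: str, value: str) -> str:
--     """Set proceed_past_level in YAML frontmatter to 'nudge' or 'null'.
--
--     Only matches lines that start at column 0 with `proceed_past_level:` — this
--     avoids clobbering an indented content line inside a block scalar (e.g.,
--     `task_summary: |-` followed by indented text containing the literal string
--     `proceed_past_level:`). Top-level YAML keys never have leading whitespace.
--
--     If the field is missing from the frontmatter, insert it before the closing '---'.
--     Operates only on the frontmatter region (text between the first two '---' lines).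
--     """
--     if not text.startswith("---"):
--         return text  # no frontmatter; refuse to mutate
--
--     lines = text.split("\n")
--     end_idx = None
--     for i in range(1, len(lines)):
--         if lines[i].strip() == "---":
--             end_idx = i
--             break
--     if end_idx is None:
--         return text  # malformed; refuse
--
--     fm_lines = lines[1:end_idx]
--     new_field = f"proceed_past_level: {value}"
--     found = False
--     for i, line in enumerate(fm_lines):
--         # Anchor at column 0 — top-level YAML keys have no leading whitespace.
--         # `line.startswith(...)` (NOT `line.strip().startswith(...)`) so that an
--         # indented occurrence inside a block scalar like `task_summary: |-` is
--         # never matched.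
--         if line.startswith("proceed_past_level:"):
--             fm_lines[i] = new_field
--             found = True
--             break
--     if not found:
--         fm_lines.append(new_field)
--
--     return "\n".join([lines[0]] + fm_lines + lines[end_idx:])
-- ===== SOURCE B (Python) =====
-- def _set_proceed_past_level(text: str, value: str) -> str:
--     """Single forward pass: copy lines, replacing/inserting the key inside the
--     frontmatter region, instead of slicing the line list into three parts."""
--     if not text.startswith("---"):
--         return text  # no frontmatter; refuse to mutate
--
--     lines = text.split("\n")
--     new_field = f"proceed_past_level: {value}"
--     out = [lines[0]]
--     replaced = False
--     for idx in range(1, len(lines)):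
--         line = lines[idx]
--         if line.strip() == "---":
--             if not replaced:
--                 out.append(new_field)
--             out.extend(lines[idx:])
--             return "\n".join(out)
--         if not replaced and line.startswith("proceed_past_level:"):
--             out.append(new_field)
--             replaced = True
--         else:
--             out.append(line)
--     return text  # no closing marker; refuse
-- ===== Notes on version B (the rewrite author's own statement) =====
-- stated objective: alternative
-- what changed: Replaces A's three-phase slice approach (find the closing-marker index, edit the lines[1:end] slice with a separate replace-or-append loop, rejoin the three parts) by a single forward pass over the lines carrying a 'replaced' flag that substitutes the first column-0 key line and inserts the field just before the closing marker if still missing.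
import Mathlib
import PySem

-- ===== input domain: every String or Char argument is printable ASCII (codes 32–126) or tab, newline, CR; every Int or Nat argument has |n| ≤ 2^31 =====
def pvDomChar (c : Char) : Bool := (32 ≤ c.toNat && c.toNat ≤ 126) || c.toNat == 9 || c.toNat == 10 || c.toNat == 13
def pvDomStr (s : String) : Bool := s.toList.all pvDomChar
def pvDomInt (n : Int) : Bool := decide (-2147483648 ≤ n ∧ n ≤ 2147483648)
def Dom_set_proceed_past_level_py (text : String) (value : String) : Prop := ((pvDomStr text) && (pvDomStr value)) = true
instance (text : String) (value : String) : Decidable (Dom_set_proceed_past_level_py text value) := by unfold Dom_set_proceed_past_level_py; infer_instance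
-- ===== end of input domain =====

-- B replaces A's slice-into-three-parts (find closing index, edit the middle slice, rejoin)
-- by one forward pass over the lines with a 'replaced' flag; objective: alternative decomposition.

-- ===== PORT A =====
-- A's first loop: index (into lines[1:]) of the first line whose strip() is "---", none if absent.
def pvFindEnd : List String → Option Nat
  | [] => none
  | l :: t => if PySem.Str.strip l == "---" then some 0 else (pvFindEnd t).map (· + 1)

-- A's second loop over fm_lines: replace the first column-0 match in place, else append.
def pvReplaceOrAppend (nf : String) : List String → List String
  | [] => [nf]
  | l :: t => if PySem.Str.startswith l "proceed_past_level:" then nf :: t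
              else l :: pvReplaceOrAppend nf t

def set_proceed_past_level_py (text : String) (value : String) : String :=
  if !(PySem.Str.startswith text "---") then text
  else
    match PySem.Str.split? text "\n" with
    | none => text          -- unreachable: separator "\n" is nonempty
    | some [] => text       -- unreachable: split always yields at least one piece
    | some (h :: rest) =>
      match pvFindEnd rest with
      | none => text        -- malformed; refuse
      | some j =>
        PySem.Str.join "\n"
          (h :: (pvReplaceOrAppend ("proceed_past_level: " ++ value) (rest.take j) ++ rest.drop j))

-- ===== PORT B =====
-- B's single pass: copy lines forward; first column-0 key line becomes nf (flag set);
-- at the closing marker emit nf first if the flag is still clear, then the tail verbatim;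
-- none if no closing marker exists.
def pvPass (nf : String) : Bool → List String → Option (List String)
  | _, [] => none
  | replaced, l :: t =>
    if PySem.Str.strip l == "---" then
      some ((if replaced then [] else [nf]) ++ l :: t)
    else if !replaced && PySem.Str.startswith l "proceed_past_level:" then
      (pvPass nf true t).map (nf :: ·)
    else
      (pvPass nf replaced t).map (l :: ·)

def set_proceed_past_level_py_alt (text : String) (value : String) : String :=
  if !(PySem.Str.startswith text "---") then text
  else
    match PySem.Str.split? text "\n" with
    | none => text
    | some [] => text
    | some (h :: rest) =>
      match pvPass ("proceed_past_level: " ++ value) false rest with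
      | none => text        -- no closing marker; refuse
      | some out => PySem.Str.join "\n" (h :: out)

-- ===== PRECONDITION & SPEC =====
def Spec_set_proceed_past_level_py (text : String) (value : String) (out : String) : Prop := out = set_proceed_past_level_py_alt text value
instance (text : String) (value : String) (out : String) : Decidable (Spec_set_proceed_past_level_py text value out) := by unfold Spec_set_proceed_past_level_py; infer_instance

-- ===== CLAIM (what is proved, stated in full; the proofs are below) =====
def Claim_equal_set_proceed_past_level_py : Prop := ∀ (text : String) (value : String), Dom_set_proceed_past_level_py text value → Spec_set_proceed_past_level_py text value (set_proceed_past_level_py text value)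

-- ===== LEMMAS AND PROOFS =====

-- Once the flag is set, B's pass copies lines verbatim; it returns some iff a closing marker exists.
theorem pvPass_true (nf : String) (ls : List String) :
    pvPass nf true ls = (pvFindEnd ls).map (fun _ => ls) := by
  induction ls with
  | nil => rfl
  | cons l t ih =>
    simp only [pvPass, pvFindEnd]
    by_cases h : (PySem.Str.strip l == "---") = true
    · simp only [h]; rfl
    · simp only [Bool.not_eq_true] at h
      simp only [h, ih]
      cases pvFindEnd t <;> rfl

-- B's pass from the clear flag computes exactly A's take/edit/drop assembly.
theorem pvPass_false (nf : String) (ls : List String) :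
    pvPass nf false ls =
      (pvFindEnd ls).map (fun j => pvReplaceOrAppend nf (ls.take j) ++ ls.drop j) := by
  induction ls with
  | nil => rfl
  | cons l t ih =>
    simp only [pvPass, pvFindEnd]
    by_cases h : (PySem.Str.strip l == "---") = true
    · simp only [h]; rfl
    · simp only [Bool.not_eq_true] at h
      by_cases hk : (PySem.Str.startswith l "proceed_past_level:") = true
      · simp only [h, hk, pvPass_true]
        cases pvFindEnd t with
        | none => rfl
        | some j =>
          have hroa : pvReplaceOrAppend nf (l :: List.take j t) = nf :: List.take j t := by
            simp only [pvReplaceOrAppend, hk]; rfl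
          simp [hroa]
      · simp only [Bool.not_eq_true] at hk
        simp only [h, hk, ih]
        cases pvFindEnd t with
        | none => rfl
        | some j =>
          have hroa : pvReplaceOrAppend nf (l :: List.take j t) = l :: pvReplaceOrAppend nf (List.take j t) := by
            simp only [pvReplaceOrAppend, hk]; rfl
          simp [hroa]

-- ===== VERDICT (by name: the statement is the Claim_ definition above) =====
theorem set_proceed_past_level_py_spec : Claim_equal_set_proceed_past_level_py := by
  intro text value _
  unfold Spec_set_proceed_past_level_py set_proceed_past_level_py set_proceed_past_level_py_alt
  cases hs : PySem.Str.startswith text "---" with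
  | false => rfl
  | true =>
    cases hsp : PySem.Str.split? text "\n" with
    | none => rfl
    | some lines =>
      cases lines with
      | nil => rfl
      | cons h rest =>
        simp only [Bool.not_true, Bool.false_eq_true, if_false, pvPass_false]
        cases pvFindEnd rest <;> rfl
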